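-- pv_equiv track=rewrite | github.com/t1ooo/geeksforgeeks | assembly-line-scheduling-dp-34/main.py | carAssemblyV2
-- ===== SOURCE A (Python) =====
-- def carAssemblyV2(a, t, e, x):
--     n = len(a[0])
--
--     first = e[0] + a[0][0]
--     second = e[1] + a[1][0]
--
--     for i in range(1, n):
--         nextFirst = min(first + a[0][i],
--                         second + a[0][i] + t[1][i])
--         nextSecond = min(second + a[1][i],
--                          first + a[1][i] + t[0][i])
--
--         first, second = nextFirst, nextSecond
--
--     first += x[0]
--     second += x[1]
--
--     return min(first, second)
-- ===== SOURCE B (Python) =====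
-- def carAssemblyV2(a, t, e, x):
--     n = len(a[0])
--     memo = {}
--
--     def cost(line, i):
--         key = (line, i)
--         if key in memo:
--             return memo[key]
--         if i == 0:
--             r = e[line] + a[line][0]
--         else:
--             r = a[line][i] + min(cost(line, i - 1),
--                                  cost(1 - line, i - 1) + t[1 - line][i])
--         memo[key] = r
--         return r
--
--     return min(cost(0, n - 1) + x[0], cost(1, n - 1) + x[1])
-- ===== Notes on version B (the rewrite author's own statement) =====
-- stated objective: alternative
-- what changed: Replaced the bottom-up rolling two-variable loop with a top-down memoized recursion cost(line, i) over stations, adding the exit costs only at the top level.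
import Mathlib
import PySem

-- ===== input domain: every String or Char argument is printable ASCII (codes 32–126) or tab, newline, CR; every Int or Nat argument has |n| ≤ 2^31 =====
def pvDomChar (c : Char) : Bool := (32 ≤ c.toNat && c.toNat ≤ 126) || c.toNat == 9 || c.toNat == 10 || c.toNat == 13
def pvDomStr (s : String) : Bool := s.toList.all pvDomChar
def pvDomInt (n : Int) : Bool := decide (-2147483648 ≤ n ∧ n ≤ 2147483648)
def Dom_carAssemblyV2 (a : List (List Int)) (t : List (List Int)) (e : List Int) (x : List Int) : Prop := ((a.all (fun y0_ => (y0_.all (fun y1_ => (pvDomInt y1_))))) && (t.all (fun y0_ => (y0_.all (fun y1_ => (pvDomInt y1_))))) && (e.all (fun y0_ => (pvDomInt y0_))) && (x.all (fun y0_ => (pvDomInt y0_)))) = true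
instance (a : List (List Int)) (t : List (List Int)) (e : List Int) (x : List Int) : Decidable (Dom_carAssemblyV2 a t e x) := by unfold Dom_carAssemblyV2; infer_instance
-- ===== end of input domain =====

-- B replaces A's bottom-up rolling two-variable loop by a top-down recursion cost(line, i)
-- over stations (memoized in Python); same O(n) cost, different decomposition.

-- list[i] / matrix[i][j]; Pre_ guarantees every such access is in range (getD default never used there)
def pvG1 (l : List Int) (i : Int) : Int := (PySem.List.pyGet? l i).getD 0
def pvG2 (m : List (List Int)) (i j : Int) : Int := (PySem.List.pyGet? ((PySem.List.pyGet? m i).getD []) j).getD 0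

-- ===== PORT A =====
def carAssemblyV2 (a : List (List Int)) (t : List (List Int)) (e : List Int) (x : List Int) : Int :=
  let n : Nat := ((PySem.List.pyGet? a 0).getD []).length
  let first := pvG1 e 0 + pvG2 a 0 0
  let second := pvG1 e 1 + pvG2 a 1 0
  let fs := (PySem.List.pyRange 1 (n : Int) 1).foldl
    (fun (fs : Int × Int) i =>
      (min (fs.1 + pvG2 a 0 i) (fs.2 + pvG2 a 0 i + pvG2 t 1 i),
       min (fs.2 + pvG2 a 1 i) (fs.1 + pvG2 a 1 i + pvG2 t 0 i)))
    (first, second)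
  min (fs.1 + pvG1 x 0) (fs.2 + pvG1 x 1)

-- ===== PORT B =====
-- cost(line, i): minimum cost to finish station i on `line` (Python memoizes; value identical)
def pvCost (a t : List (List Int)) (e : List Int) : Nat → Nat → Int
  | line, 0 => pvG1 e (line : Int) + pvG2 a (line : Int) 0
  | line, i + 1 =>
      pvG2 a (line : Int) ((i : Int) + 1) +
        min (pvCost a t e line i)
            (pvCost a t e (1 - line) i + pvG2 t ((1 - line : Nat) : Int) ((i : Int) + 1))

def carAssemblyV2_alt (a : List (List Int)) (t : List (List Int)) (e : List Int) (x : List Int) : Int :=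
  let n : Nat := ((PySem.List.pyGet? a 0).getD []).length
  min (pvCost a t e 0 (n - 1) + pvG1 x 0) (pvCost a t e 1 (n - 1) + pvG1 x 1)

-- ===== PRECONDITION & SPEC =====
-- Pre_: exactly the inputs where Python A returns (all list accesses in range; t is only
-- indexed when the loop runs, i.e. when n ≥ 2).
def Pre_carAssemblyV2 (a : List (List Int)) (t : List (List Int)) (e : List Int) (x : List Int) : Prop :=
  2 ≤ a.length ∧ 2 ≤ e.length ∧ 2 ≤ x.length ∧
  1 ≤ (a.getD 0 []).length ∧ (a.getD 0 []).length ≤ (a.getD 1 []).length ∧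
  (2 ≤ (a.getD 0 []).length →
    2 ≤ t.length ∧ (a.getD 0 []).length ≤ (t.getD 0 []).length ∧
    (a.getD 0 []).length ≤ (t.getD 1 []).length)
instance (a : List (List Int)) (t : List (List Int)) (e : List Int) (x : List Int) : Decidable (Pre_carAssemblyV2 a t e x) := by unfold Pre_carAssemblyV2; infer_instance

def pvWitness_carAssemblyV2 : List (List Int) × List (List Int) × List Int × List Int :=
  ([[4, 5], [2, 10]], [[0, 7], [0, 1]], [10, 12], [18, 7])

def Spec_carAssemblyV2 (a : List (List Int)) (t : List (List Int)) (e : List Int) (x : List Int) (out : Int) : Prop := out = carAssemblyV2_alt a t e x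
instance (a : List (List Int)) (t : List (List Int)) (e : List Int) (x : List Int) (out : Int) : Decidable (Spec_carAssemblyV2 a t e x out) := by unfold Spec_carAssemblyV2; infer_instance

-- ===== CLAIM (what is proved, stated in full; the proofs are below) =====
def Claim_equal_carAssemblyV2 : Prop := ∀ (a : List (List Int)) (t : List (List Int)) (e : List Int) (x : List Int), Dom_carAssemblyV2 a t e x → Pre_carAssemblyV2 a t e x → Spec_carAssemblyV2 a t e x (carAssemblyV2 a t e x)

-- ===== LEMMAS AND PROOFS =====

-- Invariant: A's fold up to station i carries exactly (cost 0 i, cost 1 i).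
theorem pvFold_eq_cost (a t : List (List Int)) (e : List Int) (i : Nat) :
    (PySem.List.pyRange 1 ((i : Int) + 1) 1).foldl
      (fun (fs : Int × Int) j =>
        (min (fs.1 + pvG2 a 0 j) (fs.2 + pvG2 a 0 j + pvG2 t 1 j),
         min (fs.2 + pvG2 a 1 j) (fs.1 + pvG2 a 1 j + pvG2 t 0 j)))
      (pvG1 e 0 + pvG2 a 0 0, pvG1 e 1 + pvG2 a 1 0)
    = (pvCost a t e 0 i, pvCost a t e 1 i) := by
  induction i with
  | zero =>
      rw [show ((0 : Nat) : Int) + 1 = 1 by norm_num,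
        PySem.List.pyRange_one_eq_nil (by norm_num)]
      simp [pvCost]
  | succ k ih =>
      rw [show ((k + 1 : Nat) : Int) + 1 = (((k : Int) + 1) + 1) by push_cast; ring,
        PySem.List.pyRange_one_succ_right (by omega), List.foldl_append, ih]
      simp only [List.foldl_cons, List.foldl_nil, pvCost]
      norm_num [Prod.mk.injEq]
      constructor <;> omega

theorem carAssemblyV2_eq (a t : List (List Int)) (e : List Int) (x : List Int) :
    carAssemblyV2 a t e x = carAssemblyV2_alt a t e x := by
  unfold carAssemblyV2 carAssemblyV2_alt
  dsimp only
  cases hn : ((PySem.List.pyGet? a 0).getD []).length with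
  | zero =>
      rw [show ((0 : Nat) : Int) = 0 by norm_num,
        PySem.List.pyRange_one_eq_nil (by norm_num)]
      simp [pvCost]
  | succ k =>
      rw [show ((k + 1 : Nat) : Int) = ((k : Int) + 1) by push_cast; ring,
        pvFold_eq_cost a t e k]
      simp

-- ===== VERDICT (by name: the statement is the Claim_ definition above) =====
theorem carAssemblyV2_spec : Claim_equal_carAssemblyV2 := by
  intro a t e x _ _
  exact carAssemblyV2_eq a t e x
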